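-- pv_equiv track=rewrite | github.com/benediktusmadika/Li_electrolyte_search | extractor/postprocess.py | _test_presence_flags
-- ===== SOURCE A (Python) =====
-- from typing import Any, Dict, List, Optional
--
-- TEST_TYPES = ("cycling", "rate", "storage", "rpt")
--
-- def _test_presence_flags(tests: List[Dict[str, Any]]) -> Dict[str, int]:
--     present = {test_type: 0 for test_type in TEST_TYPES}
--     for test in tests:
--         test_type = test.get("test_type")
--         if test_type in present:
--             present[test_type] = 1
--     return {
--         "Has_Cycling_Test": present["cycling"],
--         "Has_Rate_Test": present["rate"],
--         "Has_Storage_Test": present["storage"],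
--         "Has_RPT_Test": present["rpt"],
--     }
-- ===== SOURCE B (Python) =====
-- from typing import Any, Dict, List
--
-- TEST_TYPES = ("cycling", "rate", "storage", "rpt")
--
-- def _has_test(tests: List[Dict[str, Any]], test_type: str) -> bool:
--     return any(test.get("test_type") == test_type for test in tests)
--
-- def _test_presence_flags(tests: List[Dict[str, Any]]) -> Dict[str, int]:
--     return {
--         "Has_Cycling_Test": int(_has_test(tests, "cycling")),
--         "Has_Rate_Test": int(_has_test(tests, "rate")),
--         "Has_Storage_Test": int(_has_test(tests, "storage")),
--         "Has_RPT_Test": int(_has_test(tests, "rpt")),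
--     }
-- ===== Notes on version B (the rewrite author's own statement) =====
-- stated objective: simpler
-- what changed: Loop interchange: instead of one stateful pass over the tests updating a presence dict, B makes four independent early-exiting any() scans, one per flag, with no shared mutable state.
import Mathlib
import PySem

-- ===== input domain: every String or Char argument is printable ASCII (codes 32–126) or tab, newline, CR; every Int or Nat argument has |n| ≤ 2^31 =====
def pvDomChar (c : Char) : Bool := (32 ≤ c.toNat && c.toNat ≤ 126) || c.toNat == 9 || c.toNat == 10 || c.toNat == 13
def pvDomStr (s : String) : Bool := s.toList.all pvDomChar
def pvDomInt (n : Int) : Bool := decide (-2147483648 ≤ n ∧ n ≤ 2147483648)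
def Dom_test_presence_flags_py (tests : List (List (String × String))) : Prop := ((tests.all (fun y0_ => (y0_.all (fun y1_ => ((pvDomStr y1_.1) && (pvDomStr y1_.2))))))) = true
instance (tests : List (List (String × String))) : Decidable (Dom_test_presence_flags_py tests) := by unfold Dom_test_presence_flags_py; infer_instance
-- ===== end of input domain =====

-- B interchanges the loops: instead of A's single stateful pass over the tests that updates a
-- presence dict, B runs four independent early-exiting any() scans, one per flag (simpler).

-- ===== PORT A =====
def pvTestTypes : List String := ["cycling", "rate", "storage", "rpt"]

-- A's loop body: `test_type = test.get("test_type"); if test_type in present: present[test_type] = 1`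
def pvStepA (present : PySem.Dict String Int) (test : List (String × String)) : PySem.Dict String Int :=
  match test.lookup "test_type" with
  | none => present
  | some tt => if present.contains tt then present.insert tt 1 else present

def test_presence_flags_py (tests : List (List (String × String))) : List (String × Int) :=
  let present0 : PySem.Dict String Int :=
    pvTestTypes.foldl (fun d t => d.insert t 0) PySem.Dict.empty
  let present := tests.foldl pvStepA present0
  -- present[k]: each of the four keys is initialised above so the lookup never raises; getD is exact here
  [("Has_Cycling_Test", present.getD "cycling" 0),
   ("Has_Rate_Test", present.getD "rate" 0),
   ("Has_Storage_Test", present.getD "storage" 0),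
   ("Has_RPT_Test", present.getD "rpt" 0)]

-- ===== PORT B =====
-- B's helper: `any(test.get("test_type") == test_type for test in tests)`
def pvHasTest (tests : List (List (String × String))) (test_type : String) : Bool :=
  tests.any (fun test => test.lookup "test_type" == some test_type)

def test_presence_flags_py_alt (tests : List (List (String × String))) : List (String × Int) :=
  [("Has_Cycling_Test", if pvHasTest tests "cycling" then (1 : Int) else 0),
   ("Has_Rate_Test", if pvHasTest tests "rate" then (1 : Int) else 0),
   ("Has_Storage_Test", if pvHasTest tests "storage" then (1 : Int) else 0),
   ("Has_RPT_Test", if pvHasTest tests "rpt" then (1 : Int) else 0)]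

-- ===== PRECONDITION & SPEC =====
def Spec_test_presence_flags_py (tests : List (List (String × String))) (out : List (String × Int)) : Prop := out = test_presence_flags_py_alt tests
instance (tests : List (List (String × String))) (out : List (String × Int)) : Decidable (Spec_test_presence_flags_py tests out) := by unfold Spec_test_presence_flags_py; infer_instance

-- ===== CLAIM (what is proved, stated in full; the proofs are below) =====
def Claim_equal_test_presence_flags_py : Prop := ∀ (tests : List (List (String × String))), Dom_test_presence_flags_py tests → Spec_test_presence_flags_py tests (test_presence_flags_py tests)

-- ===== LEMMAS AND PROOFS =====

-- A's loop invariant: the dict's key set stays pvTestTypes, and flag k ends 1 exactly when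
-- some test's test_type is k (else the start value).
theorem pv_loop_flag (k : String) (hk : k ∈ pvTestTypes) :
    ∀ (ts : List (List (String × String))) (d : PySem.Dict String Int)
      (hC : ∀ s : String, d.contains s = decide (s ∈ pvTestTypes)),
      (ts.foldl pvStepA d).getD k 0 =
        if ts.any (fun t => t.lookup "test_type" == some k) then 1 else d.getD k 0 := by
  intro ts
  induction ts with
  | nil => intro d _; simp
  | cons t ts ih =>
    intro d hC
    simp only [List.foldl_cons, List.any_cons]
    obtain ⟨r, hlt⟩ : ∃ r, List.lookup "test_type" t = r := ⟨_, rfl⟩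
    cases r with
    | none =>
      have hstep : pvStepA d t = d := by simp [pvStepA, hlt]
      rw [hstep, ih d hC]
      simp [hlt]
    | some tt =>
      by_cases htt : tt ∈ pvTestTypes
      · have hct : d.contains tt = true := by rw [hC]; simp [htt]
        have hstep : pvStepA d t = d.insert tt 1 := by simp [pvStepA, hlt, hct]
        have hC' : ∀ s : String, (d.insert tt 1).contains s = decide (s ∈ pvTestTypes) := by
          intro s
          rw [PySem.Dict.contains_insert]
          by_cases hs : s = tt
          · subst hs; rw [hC]; simp [htt]
          · simp [hs, hC s]
        rw [hstep, ih _ hC']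
        by_cases hkt : tt = k
        · subst hkt
          simp [hlt, PySem.Dict.getD_insert_self]
        · rw [PySem.Dict.getD_insert_of_ne (hne := Ne.symm hkt)]
          simp [hlt, hkt]
      · have hct : d.contains tt = false := by rw [hC]; simp [htt]
        have hstep : pvStepA d t = d := by simp [pvStepA, hlt, hct]
        rw [hstep, ih d hC]
        have hkt : tt ≠ k := fun h => htt (h ▸ hk)
        simp [hlt, hkt]

-- the initial dict's key set is exactly pvTestTypes
theorem pv_init_contains (s : String) :
    (pvTestTypes.foldl (fun d t => d.insert t (0 : Int)) PySem.Dict.empty).contains s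
      = decide (s ∈ pvTestTypes) := by
  simp only [pvTestTypes, List.foldl_cons, List.foldl_nil,
    PySem.Dict.contains_insert, PySem.Dict.contains_empty]
  rw [Bool.eq_iff_iff]
  simp [List.mem_cons, or_comm, or_left_comm]

-- one flag of A equals the corresponding flag of B
theorem pv_flag (tests : List (List (String × String))) (k : String) (hk : k ∈ pvTestTypes)
    (h0 : (pvTestTypes.foldl (fun d t => d.insert t (0 : Int)) PySem.Dict.empty).getD k 0 = 0) :
    (tests.foldl pvStepA (pvTestTypes.foldl (fun d t => d.insert t (0 : Int)) PySem.Dict.empty)).getD k 0 =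
      if pvHasTest tests k then (1 : Int) else 0 := by
  rw [pv_loop_flag k hk tests _ pv_init_contains, h0]; rfl

-- ===== VERDICT (by name: the statement is the Claim_ definition above) =====
theorem test_presence_flags_py_spec : Claim_equal_test_presence_flags_py := by
  intro tests _
  unfold Spec_test_presence_flags_py
  simp only [test_presence_flags_py, test_presence_flags_py_alt]
  rw [pv_flag tests "cycling" (by decide) (by decide),
      pv_flag tests "rate" (by decide) (by decide),
      pv_flag tests "storage" (by decide) (by decide),
      pv_flag tests "rpt" (by decide) (by decide)]
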